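-- pv_equiv track=rewrite | github.com/paritoshtripathi935/Venom | Hackathon/hackthon_ranks.py | hackathonRanks
-- ===== SOURCE A (Python) =====
-- def hackathonRanks(n, ranks):
--     # Write your code here
--     ranks.sort()
--     count = 0
--     for i in range(n):
--         for j in range(i+1, n):
--             sum = ranks[i] + ranks[j]
--             if sum in ranks[j+1:]:
--                 count += ranks[j+1:].count(sum)
--     return count
-- ===== SOURCE B (Python) =====
-- def hackathonRanks(n, ranks):
--     # Sort, then for each index k sweep ONE two-pointer pass over the prefix
--     # before min(n, k), counting pairs ranks[i] + ranks[j] == ranks[k];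
--     # duplicate blocks are counted in closed form. O(len^2) total.
--     ranks.sort()
--     total = 0
--     for k in range(len(ranks)):
--         lo, hi = 0, min(n, k) - 1
--         while lo < hi:
--             pair = ranks[lo] + ranks[hi]
--             if pair < ranks[k]:
--                 lo += 1
--             elif pair > ranks[k]:
--                 hi -= 1
--             elif ranks[lo] == ranks[hi]:
--                 total += (hi - lo + 1) * (hi - lo) // 2
--                 break
--             else:
--                 a = lo
--                 while a < hi and ranks[a] == ranks[lo]:
--                     a += 1
--                 b = hi
--                 while b > lo and ranks[b] == ranks[hi]:
--                     b -= 1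
--                 total += (a - lo) * (hi - b)
--                 lo, hi = a, b
--     return total
-- ===== Notes on version B (the rewrite author's own statement) =====
-- stated objective: faster
-- what changed: Instead of A's nested (i,j) pair loops that scan the slice ranks[j+1:] for each pair, B iterates once over each target index k and runs a single inward two-pointer sweep over the sorted prefix before min(n,k), counting equal-value blocks in closed form, so no pair enumeration and no per-pair slice scan remain. Pre_ excludes exactly the inputs where A raises IndexError (n >= 2 with fewer than n ranks); B returns the count over the existing ranks there.
import Mathlib
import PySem

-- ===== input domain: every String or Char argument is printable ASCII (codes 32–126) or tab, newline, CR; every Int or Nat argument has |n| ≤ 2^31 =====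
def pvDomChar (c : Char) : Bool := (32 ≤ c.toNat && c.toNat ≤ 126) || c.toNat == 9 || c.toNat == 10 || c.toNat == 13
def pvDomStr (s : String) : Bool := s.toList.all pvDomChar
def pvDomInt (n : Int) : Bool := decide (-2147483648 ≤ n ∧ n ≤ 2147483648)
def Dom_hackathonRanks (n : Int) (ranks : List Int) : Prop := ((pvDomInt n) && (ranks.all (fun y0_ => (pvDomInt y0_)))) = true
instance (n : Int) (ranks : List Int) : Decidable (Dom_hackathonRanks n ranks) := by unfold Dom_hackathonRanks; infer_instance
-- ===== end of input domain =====

-- B replaces A's nested pair loops with per-pair slice scans by, for each target index k, ONE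
-- inward two-pointer sweep over the sorted prefix counting duplicate blocks in closed form
-- (objective: faster). Both A and B sort `ranks` in place (same side effect); the equivalence
-- proved is about the return value.

-- ===== PORT A =====
def hackathonRanks (n : Int) (ranks : List Int) : Int :=
  let s := PySem.List.sorted ranks (fun x => x) false
  (PySem.List.pyRange 0 n 1).foldl (fun count i =>
    (PySem.List.pyRange (i + 1) n 1).foldl (fun count j =>
      let sum := PySem.List.pyGetD s i 0 + PySem.List.pyGetD s j 0
      if sum ∈ PySem.List.slice s (some (j + 1)) none then
        count + ((PySem.List.slice s (some (j + 1)) none).count sum : Int)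
      else count) count) 0

-- ===== PORT B =====
-- Source B's two inner `while` scans and the outer `while lo < hi` loop, as fuel-bounded structural
-- recursions (the fuel is only a termination bound: each pass shrinks hi - lo, so the fuel
-- passed below never runs out; pvLoop_eq below proves sufficiency)
def pvScanUp (s : List Int) (v hi : Int) : Nat → Int → Int
  | 0, a => a
  | Nat.succ f, a =>
    if a < hi ∧ PySem.List.pyGetD s a 0 = v then pvScanUp s v hi f (a + 1) else a

def pvScanDown (s : List Int) (v lo : Int) : Nat → Int → Int
  | 0, b => b
  | Nat.succ f, b =>
    if lo < b ∧ PySem.List.pyGetD s b 0 = v then pvScanDown s v lo f (b - 1) else b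

def pvLoop (s : List Int) (t : Int) : Nat → Int → Int → Int → Int
  | 0, _, _, acc => acc
  | Nat.succ f, lo, hi, acc =>
    if lo < hi then
      if PySem.List.pyGetD s lo 0 + PySem.List.pyGetD s hi 0 < t then
        pvLoop s t f (lo + 1) hi acc
      else if t < PySem.List.pyGetD s lo 0 + PySem.List.pyGetD s hi 0 then
        pvLoop s t f lo (hi - 1) acc
      else if PySem.List.pyGetD s lo 0 = PySem.List.pyGetD s hi 0 then
        acc + PySem.Int.floordiv ((hi - lo + 1) * (hi - lo)) 2
      else
        pvLoop s t f (pvScanUp s (PySem.List.pyGetD s lo 0) hi f lo)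
          (pvScanDown s (PySem.List.pyGetD s hi 0) lo f hi)
          (acc + (pvScanUp s (PySem.List.pyGetD s lo 0) hi f lo - lo) *
                 (hi - pvScanDown s (PySem.List.pyGetD s hi 0) lo f hi))
    else acc


def hackathonRanks_alt (n : Int) (ranks : List Int) : Int :=
  let s := PySem.List.sorted ranks (fun x => x) false
  (PySem.List.pyRange 0 (s.length : Int) 1).foldl
    (fun total k => pvLoop s (PySem.List.pyGetD s k 0) (s.length + 1) 0 (min n k - 1) total) 0

-- ===== PRECONDITION & SPEC =====
-- Pre_ excludes exactly the inputs on which Python A raises IndexError: n ≥ 2 with fewer than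
-- n ranks (for n ≤ 1 the loops never index, so A returns 0 whatever the list).
def Pre_hackathonRanks (n : Int) (ranks : List Int) : Prop := n ≤ (ranks.length : Int) ∨ n ≤ 1
instance (n : Int) (ranks : List Int) : Decidable (Pre_hackathonRanks n ranks) := by unfold Pre_hackathonRanks; infer_instance
def pvWitness_hackathonRanks : Int × List Int := (4, [1, 2, 3, 3])

def Spec_hackathonRanks (n : Int) (ranks : List Int) (out : Int) : Prop := out = hackathonRanks_alt n ranks
instance (n : Int) (ranks : List Int) (out : Int) : Decidable (Spec_hackathonRanks n ranks out) := by unfold Spec_hackathonRanks; infer_instance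

-- ===== CLAIM (what is proved, stated in full; the proofs are below) =====
def Claim_equal_hackathonRanks : Prop := ∀ (n : Int) (ranks : List Int), Dom_hackathonRanks n ranks → Pre_hackathonRanks n ranks → Spec_hackathonRanks n ranks (hackathonRanks n ranks)

-- ===== LEMMAS AND PROOFS =====

lemma pvScanUp_ge (s : List Int) (v hi : Int) :
    ∀ (f : Nat) (a : Int), a ≤ pvScanUp s v hi f a := by
  intro f
  induction f with
  | zero => intro a; simp [pvScanUp]
  | succ f ih =>
    intro a
    rw [pvScanUp]
    split
    · have := ih (a + 1); omega
    · omega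

lemma pvScanUp_le (s : List Int) (v hi : Int) :
    ∀ (f : Nat) (a : Int), a ≤ hi → pvScanUp s v hi f a ≤ hi := by
  intro f
  induction f with
  | zero => intro a h; simp [pvScanUp]; omega
  | succ f ih =>
    intro a h
    rw [pvScanUp]
    split
    · exact ih (a + 1) (by omega)
    · omega

lemma pvScanUp_block (s : List Int) (v hi : Int) :
    ∀ (f : Nat) (a : Int) (i : Int), a ≤ i → i < pvScanUp s v hi f a →
      PySem.List.pyGetD s i 0 = v := by
  intro f
  induction f with
  | zero => intro a i h1 h2; simp [pvScanUp] at h2; omega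
  | succ f ih =>
    intro a i h1 h2
    rw [pvScanUp] at h2
    by_cases hg : a < hi ∧ PySem.List.pyGetD s a 0 = v
    · rw [if_pos hg] at h2
      by_cases hia : i = a
      · subst hia; exact hg.2
      · exact ih (a + 1) i (by omega) h2
    · rw [if_neg hg] at h2; omega

lemma pvScanUp_not_guard (s : List Int) (v hi : Int) :
    ∀ (f : Nat) (a : Int), (hi - a).toNat ≤ f →
      ¬(pvScanUp s v hi f a < hi ∧ PySem.List.pyGetD s (pvScanUp s v hi f a) 0 = v) := by
  intro f
  induction f with
  | zero => intro a hf; simp [pvScanUp]; omega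
  | succ f ih =>
    intro a hf
    rw [pvScanUp]
    by_cases hg : a < hi ∧ PySem.List.pyGetD s a 0 = v
    · rw [if_pos hg]; exact ih (a + 1) (by omega)
    · rw [if_neg hg]; exact hg

lemma pvScanUp_gt (s : List Int) (v hi : Int) (f : Nat) (a : Int) (hf : 1 ≤ f)
    (h1 : a < hi) (h2 : PySem.List.pyGetD s a 0 = v) : a + 1 ≤ pvScanUp s v hi f a := by
  match f, hf with
  | Nat.succ f, _ =>
    rw [pvScanUp, if_pos ⟨h1, h2⟩]
    exact pvScanUp_ge s v hi f (a + 1)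

lemma pvScanDown_le (s : List Int) (v lo : Int) :
    ∀ (f : Nat) (b : Int), pvScanDown s v lo f b ≤ b := by
  intro f
  induction f with
  | zero => intro b; simp [pvScanDown]
  | succ f ih =>
    intro b
    rw [pvScanDown]
    split
    · have := ih (b - 1); omega
    · omega

lemma pvScanDown_ge (s : List Int) (v lo : Int) :
    ∀ (f : Nat) (b : Int), lo ≤ b → lo ≤ pvScanDown s v lo f b := by
  intro f
  induction f with
  | zero => intro b h; simp [pvScanDown]; omega
  | succ f ih =>
    intro b h
    rw [pvScanDown]
    split
    · exact ih (b - 1) (by omega)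
    · omega

lemma pvScanDown_block (s : List Int) (v lo : Int) :
    ∀ (f : Nat) (b : Int) (j : Int), j ≤ b → pvScanDown s v lo f b < j →
      PySem.List.pyGetD s j 0 = v := by
  intro f
  induction f with
  | zero => intro b j h1 h2; simp [pvScanDown] at h2; omega
  | succ f ih =>
    intro b j h1 h2
    rw [pvScanDown] at h2
    by_cases hg : lo < b ∧ PySem.List.pyGetD s b 0 = v
    · rw [if_pos hg] at h2
      by_cases hjb : j = b
      · subst hjb; exact hg.2
      · exact ih (b - 1) j (by omega) h2
    · rw [if_neg hg] at h2; omega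

lemma pvScanDown_not_guard (s : List Int) (v lo : Int) :
    ∀ (f : Nat) (b : Int), (b - lo).toNat ≤ f →
      ¬(lo < pvScanDown s v lo f b ∧ PySem.List.pyGetD s (pvScanDown s v lo f b) 0 = v) := by
  intro f
  induction f with
  | zero => intro b hf; simp [pvScanDown]; omega
  | succ f ih =>
    intro b hf
    rw [pvScanDown]
    by_cases hg : lo < b ∧ PySem.List.pyGetD s b 0 = v
    · rw [if_pos hg]; exact ih (b - 1) (by omega)
    · rw [if_neg hg]; exact hg

lemma pvScanDown_lt (s : List Int) (v lo : Int) (f : Nat) (b : Int) (hf : 1 ≤ f)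
    (h1 : lo < b) (h2 : PySem.List.pyGetD s b 0 = v) : pvScanDown s v lo f b ≤ b - 1 := by
  match f, hf with
  | Nat.succ f, _ =>
    rw [pvScanDown, if_pos ⟨h1, h2⟩]
    exact pvScanDown_le s v lo f (b - 1)

noncomputable def pvInd (s : List Int) (t i j : Int) : Int :=
  if PySem.List.pyGetD s i 0 + PySem.List.pyGetD s j 0 = t then 1 else 0

noncomputable def pvPairs (s : List Int) (t lo hi : Int) : Int :=
  ∑ j ∈ Finset.Ico lo (hi + 1), ∑ i ∈ Finset.Ico lo j, pvInd s t i j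

noncomputable def pvPairSet (s : List Int) (t lo hi : Int) : Finset (Int × Int) :=
  (Finset.Ico lo (hi + 1) ×ˢ Finset.Ico lo (hi + 1)).filter
    (fun p => p.1 < p.2 ∧ PySem.List.pyGetD s p.1 0 + PySem.List.pyGetD s p.2 0 = t)

lemma pvPairs_eq_card (s : List Int) (t lo hi : Int) :
    pvPairs s t lo hi = ((pvPairSet s t lo hi).card : Int) := by
  unfold pvPairs pvPairSet
  rw [Finset.card_filter]
  push_cast
  rw [Finset.sum_product_right]
  refine Finset.sum_congr rfl ?_
  intro j hj
  have hj' := Finset.mem_Ico.mp hj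
  have hfil : Finset.Ico lo j = (Finset.Ico lo (hi + 1)).filter (fun i => i < j) := by
    ext x; simp only [Finset.mem_Ico, Finset.mem_filter]; omega
  rw [hfil, Finset.sum_filter]
  refine Finset.sum_congr rfl ?_
  intro i _
  unfold pvInd
  split_ifs <;> simp_all

lemma pvPairs_degenerate (s : List Int) (t lo hi : Int) (h : hi ≤ lo) :
    pvPairs s t lo hi = 0 := by
  unfold pvPairs
  refine Finset.sum_eq_zero ?_
  intro j hj
  have hj' := Finset.mem_Ico.mp hj
  rw [Finset.Ico_eq_empty (by omega), Finset.sum_empty]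

def pvMono (s : List Int) : Prop :=
  ∀ i j : Int, 0 ≤ i → i ≤ j → j < (s.length : Int) →
    PySem.List.pyGetD s i 0 ≤ PySem.List.pyGetD s j 0

lemma pvPairs_lo (s : List Int) (t lo hi : Int) (hm : pvMono s) (h0 : 0 ≤ lo)
    (hlen : hi < (s.length : Int)) (hlt : lo < hi)
    (hsum : PySem.List.pyGetD s lo 0 + PySem.List.pyGetD s hi 0 < t) :
    pvPairs s t lo hi = pvPairs s t (lo + 1) hi := by
  rw [pvPairs_eq_card, pvPairs_eq_card]
  congr 2
  ext p
  simp only [pvPairSet, Finset.mem_filter, Finset.mem_product, Finset.mem_Ico]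
  constructor
  · rintro ⟨⟨⟨hi1, hi2⟩, hj1, hj2⟩, hij, he⟩
    refine ⟨⟨⟨?_, hi2⟩, ⟨by omega, hj2⟩⟩, hij, he⟩
    by_contra hcon
    have hplo : p.1 = lo := by omega
    have : PySem.List.pyGetD s p.2 0 ≤ PySem.List.pyGetD s hi 0 :=
      hm p.2 hi (by omega) (by omega) hlen
    rw [hplo] at he; omega
  · rintro ⟨⟨⟨hi1, hi2⟩, hj1, hj2⟩, hij, he⟩
    exact ⟨⟨⟨by omega, hi2⟩, ⟨by omega, hj2⟩⟩, hij, he⟩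

lemma pvPairs_hi (s : List Int) (t lo hi : Int) (hm : pvMono s) (h0 : 0 ≤ lo)
    (hlen : hi < (s.length : Int)) (hlt : lo < hi)
    (hsum : t < PySem.List.pyGetD s lo 0 + PySem.List.pyGetD s hi 0) :
    pvPairs s t lo hi = pvPairs s t lo (hi - 1) := by
  rw [pvPairs_eq_card, pvPairs_eq_card]
  congr 2
  ext p
  simp only [pvPairSet, Finset.mem_filter, Finset.mem_product, Finset.mem_Ico]
  constructor
  · rintro ⟨⟨⟨hi1, hi2⟩, hj1, hj2⟩, hij, he⟩
    refine ⟨⟨⟨hi1, by omega⟩, ⟨hj1, ?_⟩⟩, hij, he⟩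
    by_contra hcon
    have hphi : p.2 = hi := by omega
    have : PySem.List.pyGetD s lo 0 ≤ PySem.List.pyGetD s p.1 0 :=
      hm lo p.1 h0 (by omega) (by omega)
    rw [hphi] at he; omega
  · rintro ⟨⟨⟨hi1, hi2⟩, hj1, hj2⟩, hij, he⟩
    exact ⟨⟨⟨hi1, by omega⟩, ⟨hj1, by omega⟩⟩, hij, he⟩

lemma pvSumArith (lo : Int) : ∀ N : Nat,
    2 * (∑ j ∈ Finset.Ico lo (lo + (N : Int)), (j - lo)) = (N : Int) * ((N : Int) - 1) := by
  intro N
  induction N with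
  | zero => simp
  | succ N ih =>
    have h1 : lo + ((N + 1 : Nat) : Int) = (lo + (N : Int)) + 1 := by push_cast; ring
    have h2 : Finset.Ico lo (lo + (N : Int) + 1) = insert (lo + (N : Int)) (Finset.Ico lo (lo + (N : Int))) := by
      ext x; simp only [Finset.mem_Ico, Finset.mem_insert]; omega
    rw [h1, h2, Finset.sum_insert (by simp)]
    push_cast
    push_cast at ih
    ring_nf
    ring_nf at ih
    omega

lemma pvPairs_allEq (s : List Int) (t lo hi : Int) (hm : pvMono s) (h0 : 0 ≤ lo)
    (hlen : hi < (s.length : Int)) (hlt : lo < hi)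
    (heq : PySem.List.pyGetD s lo 0 = PySem.List.pyGetD s hi 0)
    (hsum : PySem.List.pyGetD s lo 0 + PySem.List.pyGetD s hi 0 = t) :
    2 * pvPairs s t lo hi = (hi - lo + 1) * (hi - lo) := by
  have hall : ∀ i : Int, lo ≤ i → i ≤ hi → PySem.List.pyGetD s i 0 = PySem.List.pyGetD s lo 0 := by
    intro i h1 h2
    have ha := hm lo i h0 h1 (by omega)
    have hb := hm i hi (by omega) h2 hlen
    omega
  have hinner : ∀ j ∈ Finset.Ico lo (hi + 1),
      (∑ i ∈ Finset.Ico lo j, pvInd s t i j) = j - lo := by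
    intro j hj
    have hj' := Finset.mem_Ico.mp hj
    have : ∀ i ∈ Finset.Ico lo j, pvInd s t i j = 1 := by
      intro i hi'
      have hi'' := Finset.mem_Ico.mp hi'
      unfold pvInd
      rw [hall i hi''.1 (by omega), hall j hj'.1 (by omega), if_pos (by omega)]
    rw [Finset.sum_congr rfl this, Finset.sum_const, nsmul_eq_mul, mul_one, Int.card_Ico]
    omega
  unfold pvPairs
  rw [Finset.sum_congr rfl hinner]
  have hN : hi + 1 = lo + (((hi - lo + 1).toNat : Nat) : Int) := by omega
  rw [hN, pvSumArith lo (hi - lo + 1).toNat]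
  have h2 : (((hi - lo + 1).toNat : Nat) : Int) = hi - lo + 1 := by omega
  rw [h2]; ring

lemma pvPairs_split (s : List Int) (t lo hi a b : Int) (hm : pvMono s) (h0 : 0 ≤ lo)
    (hlen : hi < (s.length : Int)) (hlt : lo < hi)
    (hsum : PySem.List.pyGetD s lo 0 + PySem.List.pyGetD s hi 0 = t)
    (hne : PySem.List.pyGetD s lo 0 ≠ PySem.List.pyGetD s hi 0)
    (ha1 : lo + 1 ≤ a) (ha2 : a ≤ hi)
    (hablock : ∀ i, lo ≤ i → i < a → PySem.List.pyGetD s i 0 = PySem.List.pyGetD s lo 0)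
    (hav : PySem.List.pyGetD s a 0 ≠ PySem.List.pyGetD s lo 0)
    (hb1 : b ≤ hi - 1) (hb2 : lo ≤ b)
    (hbblock : ∀ j, j ≤ hi → b < j → PySem.List.pyGetD s j 0 = PySem.List.pyGetD s hi 0)
    (hbv : PySem.List.pyGetD s b 0 ≠ PySem.List.pyGetD s hi 0) :
    pvPairs s t lo hi = (a - lo) * (hi - b) + pvPairs s t a b := by
  have hlohi : PySem.List.pyGetD s lo 0 < PySem.List.pyGetD s hi 0 := by
    have := hm lo hi h0 (by omega) hlen; omega
  have c1 : ∀ i, lo ≤ i → i ≤ hi → (PySem.List.pyGetD s i 0 = PySem.List.pyGetD s lo 0 ↔ i < a) := by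
    intro i h1 h2
    constructor
    · intro hv
      by_contra hcon
      have hga : PySem.List.pyGetD s lo 0 ≤ PySem.List.pyGetD s a 0 :=
        hm lo a h0 (by omega) (by omega)
      have : PySem.List.pyGetD s a 0 ≤ PySem.List.pyGetD s i 0 :=
        hm a i (by omega) (by omega) (by omega)
      omega
    · intro h; exact hablock i h1 h
  have c2 : ∀ j, lo ≤ j → j ≤ hi → (PySem.List.pyGetD s j 0 = PySem.List.pyGetD s hi 0 ↔ b < j) := by
    intro j h1 h2
    constructor
    · intro hv
      by_contra hcon
      have hgb : PySem.List.pyGetD s b 0 ≤ PySem.List.pyGetD s hi 0 :=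
        hm b hi (by omega) (by omega) hlen
      have : PySem.List.pyGetD s j 0 ≤ PySem.List.pyGetD s b 0 :=
        hm j b (by omega) (by omega) (by omega)
      omega
    · intro h; exact hbblock j h2 h
  have hsplit : pvPairSet s t lo hi
      = (Finset.Ico lo a ×ˢ Finset.Ico (b + 1) (hi + 1)) ∪ pvPairSet s t a b := by
    ext p
    simp only [pvPairSet, Finset.mem_filter, Finset.mem_product, Finset.mem_Ico,
      Finset.mem_union]
    constructor
    · rintro ⟨⟨⟨h1, h2⟩, h3, h4⟩, hij, he⟩
      by_cases hia : p.1 < a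
      · left
        have hv1 : PySem.List.pyGetD s p.1 0 = PySem.List.pyGetD s lo 0 :=
          (c1 p.1 h1 (by omega)).mpr hia
        have hv2 : PySem.List.pyGetD s p.2 0 = PySem.List.pyGetD s hi 0 := by omega
        have := (c2 p.2 h3 (by omega)).mp hv2
        exact ⟨⟨h1, hia⟩, by omega, h4⟩
      · right
        have hv1 : PySem.List.pyGetD s p.1 0 ≠ PySem.List.pyGetD s lo 0 := by
          intro hv; exact hia ((c1 p.1 h1 (by omega)).mp hv)
        have hge : PySem.List.pyGetD s lo 0 ≤ PySem.List.pyGetD s p.1 0 :=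
          hm lo p.1 h0 h1 (by omega)
        have hv2 : PySem.List.pyGetD s p.2 0 ≠ PySem.List.pyGetD s hi 0 := by omega
        have hjb : ¬ b < p.2 := fun hc => hv2 ((c2 p.2 h3 (by omega)).mpr hc)
        exact ⟨⟨⟨by omega, by omega⟩, by omega, by omega⟩, hij, he⟩
    · rintro (⟨⟨h1, h2⟩, h3, h4⟩ | ⟨⟨⟨h1, h2⟩, h3, h4⟩, hij, he⟩)
      · have hv1 : PySem.List.pyGetD s p.1 0 = PySem.List.pyGetD s lo 0 :=
          hablock p.1 h1 h2
        have hv2 : PySem.List.pyGetD s p.2 0 = PySem.List.pyGetD s hi 0 :=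
          hbblock p.2 (by omega) (by omega)
        have hij : p.1 < p.2 := by
          by_contra hc
          have := hm p.2 p.1 (by omega) (by omega) (by omega)
          omega
        exact ⟨⟨⟨h1, by omega⟩, by omega, h4⟩, hij, by omega⟩
      · exact ⟨⟨⟨by omega, by omega⟩, by omega, by omega⟩, hij, he⟩
  have hdisj : Disjoint (Finset.Ico lo a ×ˢ Finset.Ico (b + 1) (hi + 1)) (pvPairSet s t a b) := by
    rw [Finset.disjoint_left]
    rintro p hp hp'
    simp only [Finset.mem_product, Finset.mem_Ico] at hp
    simp only [pvPairSet, Finset.mem_filter, Finset.mem_product, Finset.mem_Ico] at hp'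
    omega
  rw [pvPairs_eq_card, pvPairs_eq_card, hsplit, Finset.card_union_of_disjoint hdisj,
    Finset.card_product, Int.card_Ico, Int.card_Ico]
  have e1 : (((a - lo).toNat : Nat) : Int) = a - lo := by omega
  have e2 : (((hi + 1 - (b + 1)).toNat : Nat) : Int) = hi - b := by omega
  push_cast
  rw [e1, e2]

lemma pvLoop_eq (s : List Int) (hm : pvMono s) (t : Int) :
    ∀ (f : Nat) (lo hi acc : Int), (hi - lo).toNat < f → 0 ≤ lo → hi < (s.length : Int) →
      pvLoop s t f lo hi acc = acc + pvPairs s t lo hi := by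
  intro f
  induction f with
  | zero => intro lo hi acc hf; omega
  | succ f ih =>
    intro lo hi acc hf h0 hlen
    rw [pvLoop]
    by_cases hlt : lo < hi
    · rw [if_pos hlt]
      by_cases hc1 : PySem.List.pyGetD s lo 0 + PySem.List.pyGetD s hi 0 < t
      · rw [if_pos hc1, ih (lo + 1) hi acc (by omega) (by omega) hlen,
          pvPairs_lo s t lo hi hm h0 hlen hlt hc1]
      · rw [if_neg hc1]
        by_cases hc2 : t < PySem.List.pyGetD s lo 0 + PySem.List.pyGetD s hi 0
        · rw [if_pos hc2, ih lo (hi - 1) acc (by omega) h0 (by omega),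
            pvPairs_hi s t lo hi hm h0 hlen hlt hc2]
        · rw [if_neg hc2]
          by_cases heq : PySem.List.pyGetD s lo 0 = PySem.List.pyGetD s hi 0
          · rw [if_pos heq]
            have h2 := pvPairs_allEq s t lo hi hm h0 hlen hlt heq (by omega)
            have h3 : PySem.Int.floordiv ((hi - lo + 1) * (hi - lo)) 2 = pvPairs s t lo hi := by
              rw [PySem.Int.floordiv_eq_ediv_of_pos (by norm_num)]
              omega
            rw [h3]
          · rw [if_neg heq]
            have hf1 : 1 ≤ f := by omega
            have hgl := pvScanUp_gt s (PySem.List.pyGetD s lo 0) hi f lo hf1 hlt rfl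
            have hgl2 := pvScanUp_le s (PySem.List.pyGetD s lo 0) hi f lo (by omega)
            have hbl := pvScanDown_lt s (PySem.List.pyGetD s hi 0) lo f hi hf1 hlt rfl
            have hbl2 := pvScanDown_ge s (PySem.List.pyGetD s hi 0) lo f hi (by omega)
            have hav : PySem.List.pyGetD s (pvScanUp s (PySem.List.pyGetD s lo 0) hi f lo) 0
                ≠ PySem.List.pyGetD s lo 0 := by
              have hng := pvScanUp_not_guard s (PySem.List.pyGetD s lo 0) hi f lo (by omega)
              by_cases hcase : pvScanUp s (PySem.List.pyGetD s lo 0) hi f lo < hi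
              · intro hv; exact hng ⟨hcase, hv⟩
              · have : pvScanUp s (PySem.List.pyGetD s lo 0) hi f lo = hi := by omega
                rw [this]; omega
            have hbv : PySem.List.pyGetD s (pvScanDown s (PySem.List.pyGetD s hi 0) lo f hi) 0
                ≠ PySem.List.pyGetD s hi 0 := by
              have hng := pvScanDown_not_guard s (PySem.List.pyGetD s hi 0) lo f hi (by omega)
              by_cases hcase : lo < pvScanDown s (PySem.List.pyGetD s hi 0) lo f hi
              · intro hv; exact hng ⟨hcase, hv⟩
              · have : pvScanDown s (PySem.List.pyGetD s hi 0) lo f hi = lo := by omega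
                rw [this]; omega
            rw [ih _ _ _ (by omega) (by omega) (by omega)]
            rw [pvPairs_split s t lo hi (pvScanUp s (PySem.List.pyGetD s lo 0) hi f lo)
              (pvScanDown s (PySem.List.pyGetD s hi 0) lo f hi) hm h0 hlen hlt (by omega) heq
              hgl hgl2 (fun i h1 h2 => pvScanUp_block s (PySem.List.pyGetD s lo 0) hi f lo i h1 h2) hav
              hbl hbl2 (fun j h1 h2 => pvScanDown_block s (PySem.List.pyGetD s hi 0) lo f hi j h1 h2) hbv]
            ring
    · rw [if_neg hlt, pvPairs_degenerate s t lo hi (by omega)]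
      ring

-- ===== A-side machinery =====
def pvF (s : List Int) (i j : Int) : Int :=
  ((s.drop (j + 1).toNat).count (PySem.List.pyGetD s i 0 + PySem.List.pyGetD s j 0) : Int)

def pvInnerA (s : List Int) (i N : Int) : Int :=
  ((PySem.List.pyRange (i + 1) N 1).map (fun j => pvF s i j)).sum

def pvInnerB (s : List Int) (j : Int) : Int :=
  ((PySem.List.pyRange 0 j 1).map (fun i => pvF s i j)).sum

def pvA (s : List Int) (n : Int) : Int :=
  (PySem.List.pyRange 0 n 1).foldl (fun count i =>
    (PySem.List.pyRange (i + 1) n 1).foldl (fun count j =>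
      let sum := PySem.List.pyGetD s i 0 + PySem.List.pyGetD s j 0
      if sum ∈ PySem.List.slice s (some (j + 1)) none then
        count + ((PySem.List.slice s (some (j + 1)) none).count sum : Int)
      else count) count) 0

lemma pv_ite_count (tail : List Int) (x c : Int) :
    (if x ∈ tail then c + (tail.count x : Int) else c) = c + (tail.count x : Int) := by
  split_ifs with h
  · rfl
  · simp [List.count_eq_zero_of_not_mem h]

lemma pv_A_closed (s : List Int) (n : Int) :
    pvA s n = ((PySem.List.pyRange 0 n 1).map (fun i => pvInnerA s i n)).sum := by
  unfold pvA
  rw [PySem.List.foldl_congr_mem (g := fun acc i => acc + pvInnerA s i n)]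
  · rw [PySem.List.foldl_add]; simp
  · intro acc i hi
    rw [PySem.List.foldl_congr_mem (g := fun acc j => acc + pvF s i j)]
    · rw [PySem.List.foldl_add]; rfl
    · intro acc' j hj
      have hi0 : 0 ≤ i := (PySem.List.mem_pyRange_one.1 hi).1
      have hj0 : i + 1 ≤ j := (PySem.List.mem_pyRange_one.1 hj).1
      have h1 : (0:Int) ≤ j + 1 := by omega
      simp only [PySem.List.slice_from s h1]
      exact pv_ite_count _ _ _

lemma pv_swap (s : List Int) (M : Nat) :
    ((PySem.List.pyRange 0 (M : Int) 1).map (fun i => pvInnerA s i (M : Int))).sum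
    = ((PySem.List.pyRange 0 (M : Int) 1).map (fun j => pvInnerB s j)).sum := by
  induction M with
  | zero => simp
  | succ M ih =>
    have hcast : ((M + 1 : Nat) : Int) = (M : Int) + 1 := by push_cast; ring
    rw [hcast, PySem.List.pyRange_one_succ_right (by positivity)]
    simp only [List.map_append, List.sum_append, List.map_cons, List.map_nil, List.sum_cons,
      List.sum_nil]
    have hlast : pvInnerA s (M : Int) ((M : Int) + 1) = 0 := by
      unfold pvInnerA
      rw [PySem.List.pyRange_one_eq_nil (by omega)]; rfl
    have hsplit : ∀ i ∈ PySem.List.pyRange 0 (M : Int) 1,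
        pvInnerA s i ((M : Int) + 1) = pvInnerA s i (M : Int) + pvF s i (M : Int) := by
      intro i hi
      have hi' := PySem.List.mem_pyRange_one.1 hi
      unfold pvInnerA
      rw [PySem.List.pyRange_one_succ_right (by omega), List.map_append, List.sum_append]
      simp
    rw [List.map_congr_left hsplit, PySem.List.sum_map_add_int, hlast, ih]
    have : pvInnerB s (M : Int)
        = ((PySem.List.pyRange 0 (M : Int) 1).map (fun i => pvF s i (M : Int))).sum := rfl
    rw [this]
    ring

-- ===== bridges between list sums over pyRange and Finset sums =====
lemma pv_sum_pyRange (M : Nat) (f : Int → Int) :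
    ((PySem.List.pyRange 0 (M : Int) 1).map f).sum = ∑ k ∈ Finset.range M, f (k : Int) := by
  induction M with
  | zero => simp [PySem.List.pyRange_one_eq_nil]
  | succ M ih =>
    have hcast : ((M + 1 : Nat) : Int) = (M : Int) + 1 := by push_cast; ring
    rw [hcast, PySem.List.pyRange_one_succ_right (by positivity), List.map_append,
      List.sum_append, Finset.sum_range_succ, ih]
    simp

lemma pv_Ico_toNat (m : Int) (f : Int → Int) :
    ∑ x ∈ Finset.Ico (0 : Int) m, f x = ∑ x ∈ Finset.range m.toNat, f (x : Int) := by
  by_cases hm : 0 ≤ m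
  · obtain ⟨N, rfl⟩ : ∃ N : Nat, m = (N : Int) := ⟨m.toNat, by omega⟩
    rw [Int.toNat_natCast]
    induction N with
    | zero => simp
    | succ N ih =>
      have hcast : ((N + 1 : Nat) : Int) = (N : Int) + 1 := by push_cast; ring
      have h2 : Finset.Ico (0 : Int) ((N : Int) + 1)
          = insert (N : Int) (Finset.Ico (0 : Int) (N : Int)) := by
        ext x; simp only [Finset.mem_Ico, Finset.mem_insert]; omega
      rw [hcast, h2, Finset.sum_insert (by simp), Finset.sum_range_succ, ih (by positivity)]
      ring
  · rw [Finset.Ico_eq_empty (by omega), Int.toNat_of_nonpos (by omega)]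
    simp

-- count of v in s.drop m, as a 0/1 sum over all indices of s
lemma pv_count_drop (s : List Int) : ∀ (m : Nat) (v : Int),
    ((s.drop m).count v : Int)
    = ∑ k ∈ Finset.range s.length, (if m ≤ k ∧ s.getD k 0 = v then (1 : Int) else 0) := by
  induction s with
  | nil => intro m v; simp
  | cons a tl ih =>
    intro m v
    rw [List.length_cons, Finset.sum_range_succ']
    match m with
    | 0 =>
      simp only [List.drop_zero, List.count_cons, List.getD_cons_succ, List.getD_cons_zero,
        Nat.zero_le, true_and]
      have hih := ih 0 v
      simp only [List.drop_zero, Nat.zero_le, true_and] at hih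
      push_cast
      rw [hih]
      have hbeq : (if (a == v) = true then (1 : Int) else 0) = (if a = v then (1 : Int) else 0) := by
        split_ifs with h1 h2 <;> simp_all
      rw [hbeq]
    | Nat.succ m' =>
      simp only [List.drop_succ_cons, List.getD_cons_succ, List.getD_cons_zero]
      rw [ih m' v]
      have h0 : (if m' + 1 ≤ 0 ∧ a = v then (1 : Int) else 0) = 0 := by
        rw [if_neg]; omega
      rw [h0, add_zero]
      refine Finset.sum_congr rfl ?_
      intro k _
      congr 1
      simp only [eq_iff_iff]
      omega

lemma pv_exchange (L n' : Nat) (g : Nat → Int) :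
    ∑ j ∈ Finset.range n', ∑ i ∈ Finset.range j, ∑ k ∈ Finset.range L,
      (if j < k ∧ g i + g j = g k then (1 : Int) else 0)
    = ∑ k ∈ Finset.range L, ∑ j ∈ Finset.range (min n' k), ∑ i ∈ Finset.range j,
      (if g i + g j = g k then (1 : Int) else 0) := by
  have h1 : ∀ j ∈ Finset.range n',
      ∑ i ∈ Finset.range j, ∑ k ∈ Finset.range L,
        (if j < k ∧ g i + g j = g k then (1 : Int) else 0)
      = ∑ k ∈ Finset.range L, ∑ i ∈ Finset.range j,
        (if j < k ∧ g i + g j = g k then (1 : Int) else 0) :=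
    fun j _ => Finset.sum_comm
  rw [Finset.sum_congr rfl h1, Finset.sum_comm]
  refine Finset.sum_congr rfl ?_
  intro k _
  have hfil : Finset.range (min n' k) = (Finset.range n').filter (fun j => j < k) := by
    ext x; simp only [Finset.mem_filter, Finset.mem_range]; omega
  rw [hfil, Finset.sum_filter]
  refine Finset.sum_congr rfl ?_
  intro j _
  by_cases hjk : j < k
  · simp only [hjk, if_true, true_and]
  · simp [hjk]

noncomputable def pvB (s : List Int) (n : Int) : Int :=
  (PySem.List.pyRange 0 (s.length : Int) 1).foldl
    (fun total k => pvLoop s (PySem.List.pyGetD s k 0) (s.length + 1) 0 (min n k - 1) total) 0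

lemma pvPairs_to_nat (s : List Int) (t m : Int) :
    pvPairs s t 0 (m - 1) = ∑ j ∈ Finset.range m.toNat, ∑ i ∈ Finset.range j,
      (if s.getD i 0 + s.getD j 0 = t then (1 : Int) else 0) := by
  unfold pvPairs
  rw [show m - 1 + 1 = m from by ring]
  rw [pv_Ico_toNat m (fun j => ∑ i ∈ Finset.Ico (0 : Int) j, pvInd s t i j)]
  refine Finset.sum_congr rfl ?_
  intro j _
  rw [pv_Ico_toNat ((j : Nat) : Int) (fun i => pvInd s t i ((j : Nat) : Int)), Int.toNat_natCast]
  refine Finset.sum_congr rfl ?_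
  intro i _
  unfold pvInd
  simp only [PySem.List.pyGetD_natCast]

lemma pv_B_closed (s : List Int) (hm : pvMono s) (n : Int) :
    pvB s n = ∑ k ∈ Finset.range s.length, ∑ j ∈ Finset.range (min n.toNat k),
      ∑ i ∈ Finset.range j, (if s.getD i 0 + s.getD j 0 = s.getD k 0 then (1 : Int) else 0) := by
  unfold pvB
  rw [PySem.List.foldl_congr_mem
    (g := fun total k => total + pvPairs s (PySem.List.pyGetD s k 0) 0 (min n k - 1))]
  · rw [PySem.List.foldl_add]
    simp only [zero_add]
    rw [pv_sum_pyRange s.length (fun k => pvPairs s (PySem.List.pyGetD s k 0) 0 (min n k - 1))]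
    refine Finset.sum_congr rfl ?_
    intro k _
    rw [pvPairs_to_nat]
    have hmin : (min n ((k : Nat) : Int)).toNat = min n.toNat k := by omega
    rw [hmin]
    simp only [PySem.List.pyGetD_natCast]
  · intro acc k hk
    have hk' := PySem.List.mem_pyRange_one.1 hk
    exact pvLoop_eq s hm (PySem.List.pyGetD s k 0) (s.length + 1) 0 (min n k - 1) acc
      (by omega) (by norm_num) (by omega)

lemma pv_A_final (s : List Int) (n : Int) :
    pvA s n = ∑ j ∈ Finset.range n.toNat, ∑ i ∈ Finset.range j, ∑ k ∈ Finset.range s.length,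
      (if j < k ∧ s.getD i 0 + s.getD j 0 = s.getD k 0 then (1 : Int) else 0) := by
  by_cases hn : 0 ≤ n
  · obtain ⟨M, rfl⟩ : ∃ M : ℕ, n = (M : Int) := ⟨n.toNat, by omega⟩
    rw [pv_A_closed, pv_swap, pv_sum_pyRange M (pvInnerB s), Int.toNat_natCast]
    refine Finset.sum_congr rfl ?_
    intro j _
    unfold pvInnerB
    rw [pv_sum_pyRange j (fun i => pvF s i ((j : Nat) : Int))]
    refine Finset.sum_congr rfl ?_
    intro i _
    unfold pvF
    have h1 : (((j : Nat) : Int) + 1).toNat = j + 1 := by omega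
    rw [h1, pv_count_drop s (j + 1)]
    simp only [PySem.List.pyGetD_natCast]
    refine Finset.sum_congr rfl ?_
    intro k _
    congr 1
    simp only [eq_iff_iff]
    constructor
    · rintro ⟨ha, hb⟩; exact ⟨by omega, hb.symm⟩
    · rintro ⟨ha, hb⟩; exact ⟨by omega, hb.symm⟩
  · rw [show n.toNat = 0 from by omega]
    unfold pvA
    rw [PySem.List.pyRange_one_eq_nil (by omega)]
    simp

lemma pv_mono_sorted (ranks : List Int) :
    pvMono (PySem.List.sorted ranks (fun x => x) false) := by
  intro i j h0 hij hlen
  rw [PySem.List.pyGetD_eq_getElem _ 0 h0 (by omega),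
    PySem.List.pyGetD_eq_getElem _ 0 (by omega) hlen]
  exact PySem.List.sorted_id_getElem_mono ranks (by omega) (by omega)

lemma pv_main (n : Int) (ranks : List Int) :
    pvA (PySem.List.sorted ranks (fun x => x) false) n
    = pvB (PySem.List.sorted ranks (fun x => x) false) n := by
  rw [pv_A_final, pv_B_closed _ (pv_mono_sorted ranks) n,
    pv_exchange (PySem.List.sorted ranks (fun x => x) false).length n.toNat
      (fun k => (PySem.List.sorted ranks (fun x => x) false).getD k 0)]

-- ===== VERDICT =====
theorem hackathonRanks_spec : Claim_equal_hackathonRanks := by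
  intro n ranks _ _
  unfold Spec_hackathonRanks hackathonRanks hackathonRanks_alt
  exact pv_main n ranks
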